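-- pv_equiv track=rewrite | github.com/JCake/PythonAdventOfCode2025 | adventOfCode/day4.py | removable_spots
-- ===== SOURCE A (Python) =====
-- def removable_spots(lines: list[str]) -> list[list[int]]:
--     num_lines = len(lines)
--     num_columns = len(lines[0])
--     accessible_spots = []
--     for i in range(num_lines):
--         for j in range(num_columns):
--             if lines[i][j] == '@':
--                 neighbors = 0
--                 for i_n in range(i-1, i+2):
--                     for j_n in range(j-1, j+2):
--                         if 0 <= i_n < num_lines and 0 <= j_n < num_columns:
--                             if lines[i_n][j_n] == '@':
--                                 neighbors += 1
--                 if neighbors <= 4: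
--                     accessible_spots.insert(0, [i,j])
--     return accessible_spots
-- ===== SOURCE B (Python) =====
-- def removable_spots(lines: list[str]) -> list[list[int]]:
--     n = len(lines)
--     m = len(lines[0])
--     # per-row prefix sums of '@': pref[r][k] = number of '@' among lines[r][:k]
--     pref = []
--     for line in lines:
--         row = [0]
--         for j in range(m):
--             row.append(row[-1] + (line[j] == '@'))
--         pref.append(row)
--     out = []
--     for i in range(n):
--         lo = max(0, i - 1)
--         hi = min(n, i + 2)
--         line = lines[i]
--         for j in range(m):
--             if line[j] == '@':
--                 left = max(0, j - 1)
--                 right = min(m, j + 2)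
--                 total = 0
--                 for r in range(lo, hi):
--                     total += pref[r][right] - pref[r][left]
--                 if total <= 4:
--                     out.append([i, j])
--     out.reverse()
--     return out
-- ===== Notes on version B (the rewrite author's own statement) =====
-- stated objective: alternative
-- what changed: Replaces the per-cell 3x3 bounds-checked grid probing with per-row prefix-sum tables of '@' counts, so each cell's neighborhood count is three subtractions of clamped window sums; output is appended in scan order and reversed once instead of insert(0); it trades the 9 guarded probes per '@' cell for an O(n*m) table build.
import Mathlib
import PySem

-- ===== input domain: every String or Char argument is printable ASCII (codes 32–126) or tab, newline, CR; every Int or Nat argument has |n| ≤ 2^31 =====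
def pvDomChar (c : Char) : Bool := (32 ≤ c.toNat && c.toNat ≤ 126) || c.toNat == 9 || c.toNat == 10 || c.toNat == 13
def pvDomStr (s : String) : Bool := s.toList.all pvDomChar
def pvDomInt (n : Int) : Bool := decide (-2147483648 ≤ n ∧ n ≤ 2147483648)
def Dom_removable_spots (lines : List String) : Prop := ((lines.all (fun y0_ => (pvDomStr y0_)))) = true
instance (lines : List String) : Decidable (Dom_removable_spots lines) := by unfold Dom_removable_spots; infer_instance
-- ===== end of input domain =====

-- B replaces A's bounds-checked 3x3 probing by per-row prefix-sum tables (window counts by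
-- subtraction) and builds the output by append + one final reverse instead of insert(0).

-- ===== PORT A =====
def removable_spots (lines : List String) : List (List Int) :=
  let numLines : Int := lines.length
  let numCols : Int := PySem.Str.len (PySem.List.pyGetD lines 0 "")
  (PySem.List.pyRange 0 numLines 1).foldl (fun acc i =>
    (PySem.List.pyRange 0 numCols 1).foldl (fun acc j =>
      if PySem.List.pyGetD (PySem.List.pyGetD lines i "").toList j ' ' = '@' then
        let neighbors : Int := (PySem.List.pyRange (i-1) (i+2) 1).foldl (fun nb i_n =>
          (PySem.List.pyRange (j-1) (j+2) 1).foldl (fun nb j_n =>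
            if 0 ≤ i_n ∧ i_n < numLines ∧ 0 ≤ j_n ∧ j_n < numCols then
              if PySem.List.pyGetD (PySem.List.pyGetD lines i_n "").toList j_n ' ' = '@' then
                nb + 1
              else nb
            else nb) nb) 0
        if neighbors ≤ 4 then [i, j] :: acc else acc
      else acc) acc) []

-- ===== PORT B =====
def removable_spots_alt (lines : List String) : List (List Int) :=
  let n : Int := lines.length
  let m : Int := PySem.Str.len (PySem.List.pyGetD lines 0 "")
  let pref : List (List Int) := lines.foldl (fun pref line =>
    pref ++ [(PySem.List.pyRange 0 m 1).foldl (fun row j =>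
      row ++ [PySem.List.pyGetD row (-1) 0 +
        (if PySem.List.pyGetD line.toList j ' ' = '@' then 1 else 0)]) [0]]) []
  let out : List (List Int) := (PySem.List.pyRange 0 n 1).foldl (fun out i =>
    let lo := max 0 (i - 1)
    let hi := min n (i + 2)
    let line := PySem.List.pyGetD lines i ""
    (PySem.List.pyRange 0 m 1).foldl (fun out j =>
      if PySem.List.pyGetD line.toList j ' ' = '@' then
        let left := max 0 (j - 1)
        let right := min m (j + 2)
        let total : Int := (PySem.List.pyRange lo hi 1).foldl (fun t r =>
          t + (PySem.List.pyGetD (PySem.List.pyGetD pref r []) right 0 -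
               PySem.List.pyGetD (PySem.List.pyGetD pref r []) left 0)) 0
        if total ≤ 4 then out ++ [[i, j]] else out
      else out) out) []
  out.reverse

-- ===== PRECONDITION & SPEC =====
-- Pre_ excludes exactly the inputs on which A raises IndexError: the empty list (lines[0])
-- and ragged inputs with a row shorter than row 0 (lines[i][j] with j < len(lines[0])).
def Pre_removable_spots (lines : List String) : Prop :=
  lines ≠ [] ∧ ∀ s ∈ lines, PySem.Str.len (PySem.List.pyGetD lines 0 "") ≤ PySem.Str.len s
instance (lines : List String) : Decidable (Pre_removable_spots lines) := by
  unfold Pre_removable_spots; infer_instance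
def pvWitness_removable_spots : List String := ["@@.", ".@@", "@.@"]
def Spec_removable_spots (lines : List String) (out : List (List Int)) : Prop := out = removable_spots_alt lines
instance (lines : List String) (out : List (List Int)) : Decidable (Spec_removable_spots lines out) := by unfold Spec_removable_spots; infer_instance

-- ===== CLAIM (what is proved, stated in full; the proofs are below) =====
def Claim_equal_removable_spots : Prop := ∀ (lines : List String), Dom_removable_spots lines → Pre_removable_spots lines → Spec_removable_spots lines (removable_spots lines)

-- ===== LEMMAS AND PROOFS =====

-- pvCnt s k = number of '@' among the first k characters of s (the value pref[r][k] holds in B)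
def pvCnt (s : List Char) (k : Nat) : Int := ((s.take k).countP (· == '@') : Int)

theorem pvCnt_succ (s : List Char) (k : Nat) :
    pvCnt s (k+1) = pvCnt s k + (if PySem.List.pyGetD s (k : Int) ' ' = '@' then 1 else 0) := by
  simp only [pvCnt, List.take_add_one, PySem.List.pyGetD_natCast, List.countP_append,
    List.getD_eq_getElem?_getD]
  rcases h : s[k]? with _ | c
  · simp
  · by_cases hc : c = '@' <;> simp [hc]

theorem pvPrefRow (s : List Char) (M : Nat) :
    (PySem.List.pyRange 0 (M : Int) 1).foldl (fun row j => row ++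
      [PySem.List.pyGetD row (-1) 0 + (if PySem.List.pyGetD s j ' ' = '@' then 1 else 0)]) [0]
    = (List.range (M+1)).map (fun k => pvCnt s k) := by
  induction M with
  | zero => simp [pvCnt]
  | succ M ih =>
    rw [show ((M+1 : Nat) : Int) = (M : Int) + 1 by push_cast; ring,
        PySem.List.pyRange_one_succ_right (by positivity), List.foldl_append, ih]
    simp [List.range_succ, PySem.List.pyGetD_neg_one_append_singleton, pvCnt_succ]

-- pvT is the value one guarded cell contributes to A's neighbor count (row guard known true)
def pvT (s : List Char) (mN : Nat) (c : Int) : Int :=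
  if 0 ≤ c ∧ c < (mN : Nat) ∧ PySem.List.pyGetD s c ' ' = '@' then 1 else 0

theorem pvT_natCast (s : List Char) (mN : Nat) (k : Nat) (h : k < mN) :
    pvT s mN (k : Int) = (if PySem.List.pyGetD s (k : Int) ' ' = '@' then 1 else 0) := by
  have h' : (k : Int) < (mN : Int) := by omega
  simp [pvT, h']

theorem pvT_zero (s : List Char) (mN : Nat) (c : Int) (h : ¬ (0 ≤ c ∧ c < (mN : Int))) :
    pvT s mN c = 0 := by
  simp only [pvT]; rw [if_neg (by tauto)]

theorem pvWindowN (s : List Char) (mN jN : Nat) (hjm : jN < mN) :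
    pvCnt s (min mN (jN+2)) - pvCnt s (jN-1) =
      pvT s mN ((jN:Int)-1) + (pvT s mN (jN:Int) + pvT s mN ((jN:Int)+1)) := by
  have hA := pvCnt_succ s (jN - 1)
  have hB := pvCnt_succ s jN
  have hC := pvCnt_succ s (jN + 1)
  rcases Nat.eq_zero_or_pos jN with h0 | h1
  · subst h0
    have hT : pvT s mN ((0:Nat) - 1 : Int) = 0 := pvT_zero _ _ _ (by omega)
    rcases Nat.lt_or_ge mN 2 with hm2 | hm2
    · rw [show min mN (0+2) = 0 + 1 from by omega, hB,
        pvT_natCast s mN 0 (by omega), pvT_zero s mN (((0:Nat):Int)+1) (by omega)]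
      rw [hT]; simp [pvCnt]
    · rw [show min mN (0+2) = (0+1) + 1 from by omega, hC, hB,
        pvT_natCast s mN 0 (by omega),
        show ((0:Nat):Int) + 1 = (((0:Nat)+1 : Nat) : Int) from by omega,
        pvT_natCast s mN (0+1) (by omega)]
      rw [hT]; simp [pvCnt]
  · have e1 : jN - 1 + 1 = jN := by omega
    rw [e1] at hA
    have hc1 : (jN : Int) - 1 = ((jN - 1 : Nat) : Int) := by omega
    rcases Nat.lt_or_ge mN (jN+2) with hm2 | hm2
    · rw [show min mN (jN+2) = jN + 1 from by omega, hB, hA,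
        pvT_zero s mN ((jN:Int)+1) (by omega), hc1,
        pvT_natCast s mN (jN-1) (by omega), pvT_natCast s mN jN (by omega)]
      ring
    · rw [show min mN (jN+2) = (jN+1) + 1 from by omega, hC, hB, hA, hc1,
        pvT_natCast s mN (jN-1) (by omega), pvT_natCast s mN jN (by omega),
        show (jN:Int) + 1 = ((jN + 1 : Nat) : Int) from by omega,
        pvT_natCast s mN (jN+1) (by omega)]
      ring

theorem pvRange3 (a : Int) : PySem.List.pyRange (a-1) (a+2) 1 = [a-1, a, a+1] := by
  rw [PySem.List.pyRange_one_cons (by omega), PySem.List.pyRange_one_cons (by omega),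
      PySem.List.pyRange_one_cons (by omega), PySem.List.pyRange_one_eq_nil (by omega)]
  norm_num

-- A's 3x3 bounds-guarded probe count equals B's sum of prefix-table window differences
theorem pvCountEq (lines : List String) (nN mN : Nat) (hn : lines.length = nN)
    (pref : List (List Int))
    (hpref : pref = lines.map (fun line => (List.range (mN+1)).map (fun k => pvCnt line.toList k)))
    (i j : Int) (hi0 : 0 ≤ i) (hin : i < (nN:Int)) (hj0 : 0 ≤ j) (hjm : j < (mN:Int)) :
    (PySem.List.pyRange (i-1) (i+2) 1).foldl (fun nb i_n =>
        (PySem.List.pyRange (j-1) (j+2) 1).foldl (fun nb j_n =>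
          if 0 ≤ i_n ∧ i_n < (nN:Int) ∧ 0 ≤ j_n ∧ j_n < (mN:Int) then
            if PySem.List.pyGetD (PySem.List.pyGetD lines i_n "").toList j_n ' ' = '@' then nb + 1
            else nb
          else nb) nb) 0
    = (PySem.List.pyRange (max 0 (i-1)) (min (nN:Int) (i+2)) 1).foldl (fun t r =>
        t + (PySem.List.pyGetD (PySem.List.pyGetD pref r []) (min (mN:Int) (j+2)) 0 -
             PySem.List.pyGetD (PySem.List.pyGetD pref r []) (max 0 (j-1)) 0)) 0 := by
  have hstep : ∀ (nb r c : Int),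
      (if 0 ≤ r ∧ r < (nN:Int) ∧ 0 ≤ c ∧ c < (mN:Int) then
        if PySem.List.pyGetD (PySem.List.pyGetD lines r "").toList c ' ' = '@' then nb + 1
        else nb
      else nb)
      = nb + (if 0 ≤ r ∧ r < (nN:Int) then pvT (PySem.List.pyGetD lines r "").toList mN c else 0) := by
    intro nb r c
    simp only [pvT]
    split_ifs <;> first | omega | tauto
  have rowEq : ∀ r : Int, 0 ≤ r → r < (nN:Int) →
      PySem.List.pyGetD (PySem.List.pyGetD pref r []) (min (mN:Int) (j+2)) 0 -
      PySem.List.pyGetD (PySem.List.pyGetD pref r []) (max 0 (j-1)) 0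
      = (if 0 ≤ r ∧ r < (nN:Int) then pvT (PySem.List.pyGetD lines r "").toList mN (j-1) else 0)
        + ((if 0 ≤ r ∧ r < (nN:Int) then pvT (PySem.List.pyGetD lines r "").toList mN j else 0)
        + (if 0 ≤ r ∧ r < (nN:Int) then pvT (PySem.List.pyGetD lines r "").toList mN (j+1) else 0)) := by
    intro r hr0 hrn
    have hrlt : r.toNat < lines.length := by omega
    have hrow : PySem.List.pyGetD pref r [] =
        (List.range (mN+1)).map (fun k => pvCnt (lines[r.toNat]).toList k) := by
      rw [hpref, PySem.List.pyGetD_eq_getElem _ _ (by omega) (by simp; omega)]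
      simp
    have hline : PySem.List.pyGetD lines r "" = lines[r.toNat] := by
      rw [PySem.List.pyGetD_eq_getElem _ _ (by omega) (by omega)]
    have hgetk : ∀ k : Nat, k ≤ mN →
        PySem.List.pyGetD ((List.range (mN+1)).map (fun k => pvCnt (lines[r.toNat]).toList k)) (k:Int) 0
        = pvCnt (lines[r.toNat]).toList k := by
      intro k hk
      rw [PySem.List.pyGetD_natCast]
      rw [List.getD_eq_getElem?_getD]
      simp [List.getElem?_map, List.getElem?_range (by omega : k < mN+1)]
    have hcmin : min ((mN:Nat):Int) (j+2) = ((min mN (j.toNat+2) : Nat) : Int) := by omega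
    have hcmax : max 0 (j-1) = ((j.toNat - 1 : Nat) : Int) := by omega
    rw [hrow, hcmin, hcmax, hgetk _ (by omega), hgetk _ (by omega)]
    have hw := pvWindowN (lines[r.toNat]).toList mN j.toNat (by omega)
    rw [show ((j.toNat:Nat):Int) - 1 = j - 1 from by omega,
        show ((j.toNat:Nat):Int) + 1 = j + 1 from by omega,
        show ((j.toNat:Nat):Int) = j from by omega] at hw
    rw [hw, hline, if_pos ⟨hr0, hrn⟩, if_pos ⟨hr0, hrn⟩, if_pos ⟨hr0, hrn⟩]
  have hzero : ∀ c : Int, ∀ r : Int, ¬ (0 ≤ r ∧ r < (nN:Int)) →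
      (if 0 ≤ r ∧ r < (nN:Int) then pvT (PySem.List.pyGetD lines r "").toList mN c else 0) = 0 := by
    intro c r h; rw [if_neg h]
  rw [pvRange3 i, pvRange3 j]
  simp only [List.foldl_cons, List.foldl_nil, hstep]
  rcases Nat.lt_or_ge i.toNat 1 with hc1 | hc1
  · rcases Nat.lt_or_ge nN 2 with hc2 | hc2
    · rw [show max 0 (i-1) = i from by omega, show min (nN:Int) (i+2) = i+1 from by omega,
          PySem.List.pyRange_one_cons (by omega), PySem.List.pyRange_one_eq_nil (by omega)]
      simp only [List.foldl_cons, List.foldl_nil]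
      rw [rowEq i (by omega) (by omega)]
      rw [hzero _ (i-1) (by omega), hzero _ (i-1) (by omega), hzero _ (i-1) (by omega),
          hzero _ (i+1) (by omega), hzero _ (i+1) (by omega), hzero _ (i+1) (by omega)]
      ring
    · rw [show max 0 (i-1) = i from by omega, show min (nN:Int) (i+2) = i+2 from by omega,
          PySem.List.pyRange_one_cons (by omega), PySem.List.pyRange_one_cons (by omega),
          PySem.List.pyRange_one_eq_nil (by omega)]
      simp only [List.foldl_cons, List.foldl_nil]
      rw [rowEq i (by omega) (by omega), rowEq (i+1) (by omega) (by omega)]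
      rw [hzero _ (i-1) (by omega), hzero _ (i-1) (by omega), hzero _ (i-1) (by omega)]
      ring
  · rcases Nat.lt_or_ge nN (i.toNat+2) with hc2 | hc2
    · rw [show max 0 (i-1) = i-1 from by omega, show min (nN:Int) (i+2) = i+1 from by omega,
          PySem.List.pyRange_one_cons (by omega), PySem.List.pyRange_one_cons (by omega),
          PySem.List.pyRange_one_eq_nil (by omega)]
      simp only [List.foldl_cons, List.foldl_nil]
      rw [show i - 1 + 1 = i from by ring]
      rw [rowEq (i-1) (by omega) (by omega), rowEq i (by omega) (by omega)]
      rw [hzero _ (i+1) (by omega), hzero _ (i+1) (by omega), hzero _ (i+1) (by omega)]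
      ring
    · rw [show max 0 (i-1) = i-1 from by omega, show min (nN:Int) (i+2) = i+2 from by omega,
          PySem.List.pyRange_one_cons (by omega), PySem.List.pyRange_one_cons (by omega),
          PySem.List.pyRange_one_cons (by omega), PySem.List.pyRange_one_eq_nil (by omega)]
      simp only [List.foldl_cons, List.foldl_nil]
      rw [show i - 1 + 1 = i from by ring]
      rw [rowEq (i-1) (by omega) (by omega), rowEq i (by omega) (by omega),
          rowEq (i+1) (by omega) (by omega)]
      ring

-- A's inner loop: guarded insert(0) collects the reversed filtered hits
theorem pvConsNest {α : Type} (l : List Int) (q : Int → Prop) [DecidablePred q] (c : Int → Int)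
    (e : Int → α) (acc : List α) :
    l.foldl (fun acc j => if q j then (if c j ≤ 4 then e j :: acc else acc) else acc) acc
    = (List.map e (List.filter (fun j => decide (q j ∧ c j ≤ 4)) l)).reverse ++ acc := by
  induction l generalizing acc with
  | nil => simp
  | cons x l ih =>
    by_cases hq : q x <;> by_cases hc : c x ≤ 4 <;> simp [hq, hc, ih]

-- B's inner loop: guarded append collects the filtered hits
theorem pvAppNest {α : Type} (l : List Int) (q : Int → Prop) [DecidablePred q] (c : Int → Int)
    (e : Int → α) (acc : List α) :
    l.foldl (fun acc j => if q j then (if c j ≤ 4 then acc ++ [e j] else acc) else acc) acc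
    = acc ++ List.map e (List.filter (fun j => decide (q j ∧ c j ≤ 4)) l) := by
  induction l generalizing acc with
  | nil => simp
  | cons x l ih =>
    by_cases hq : q x <;> by_cases hc : c x ≤ 4 <;> simp [hq, hc, ih]

theorem pvFoldlRevBlocks {α β : Type} (h : α → List β) (l : List α) (acc : List β) :
    l.foldl (fun acc i => (h i).reverse ++ acc) acc = (l.flatMap h).reverse ++ acc := by
  induction l generalizing acc with
  | nil => simp
  | cons x l ih => simp [ih]

-- ===== VERDICT (by name: the statement is the Claim_ definition above) =====
theorem removable_spots_spec : Claim_equal_removable_spots := by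
  unfold Claim_equal_removable_spots
  intro lines _dom hpre
  obtain ⟨hne, hlen⟩ := hpre
  unfold Spec_removable_spots removable_spots removable_spots_alt
  have hm : PySem.Str.len (PySem.List.pyGetD lines 0 "") =
      (((PySem.List.pyGetD lines 0 "").toList.length : Nat) : Int) := by
    simp [PySem.Str.len_eq]
  simp only [hm]
  have hpref : (lines.foldl (fun pref line =>
      pref ++ [(PySem.List.pyRange 0 (((PySem.List.pyGetD lines 0 "").toList.length : Nat) : Int) 1).foldl
        (fun row j => row ++ [PySem.List.pyGetD row (-1) 0 +
          (if PySem.List.pyGetD line.toList j ' ' = '@' then 1 else 0)]) [0]]) [])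
      = lines.map (fun line =>
          (List.range ((PySem.List.pyGetD lines 0 "").toList.length + 1)).map
            (fun k => pvCnt line.toList k)) := by
    rw [PySem.List.foldl_append_singleton_eq_map]
    simp only [List.nil_append]
    exact List.map_congr_left (fun line _ => pvPrefRow line.toList _)
  simp only [hpref]
  simp only [pvConsNest, pvAppNest]
  rw [pvFoldlRevBlocks, PySem.List.foldl_append_eq_flatMap]
  simp only [List.append_nil, List.nil_append]
  congr 1
  apply List.flatMap_congr
  intro i hi
  rw [PySem.List.mem_pyRange_one] at hi
  congr 1
  apply List.filter_congr
  intro j hj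
  rw [PySem.List.mem_pyRange_one] at hj
  rw [decide_eq_decide]
  constructor
  · rintro ⟨hc, hcnt⟩
    refine ⟨hc, ?_⟩
    rw [← pvCountEq lines lines.length (PySem.List.pyGetD lines 0 "").toList.length rfl _ rfl
      i j hi.1 hi.2 hj.1 hj.2]
    exact hcnt
  · rintro ⟨hc, hcnt⟩
    refine ⟨hc, ?_⟩
    rw [pvCountEq lines lines.length (PySem.List.pyGetD lines 0 "").toList.length rfl _ rfl
      i j hi.1 hi.2 hj.1 hj.2]
    exact hcnt
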